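-- pv_equiv track=rewrite | github.com/pypi-data/pypi-mirror-46 | packages/tokenizer-cstm/tokenizer_cstm-0.7-py3-none-any.whl/tokenizer_cstm/determine_language.py | determine_language
-- ===== SOURCE A (Python) =====
-- def determine_language(word_list, language_col_dict):
--     max_occurance = 0
--     key_max = None
--
--     for key in language_col_dict:
--         current_occruance = number_of_occurance(word_list,language_col_dict[key])
--         if current_occruance == max_occurance:
--             key_max = None
--         if current_occruance > max_occurance:
--             key_max = key
--             max_occurance = current_occruance
--     return key_max
--
-- def number_of_occurance(word_list, language_dict):
--     wordcount = 0
--     for word in word_list: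
--         if word in language_dict:
--             wordcount += 1
--     return wordcount
-- ===== SOURCE B (Python) =====
-- def determine_language(word_list, language_col_dict):
--     # Inverted index: word -> list of language keys whose dictionary contains it.
--     index = {}
--     for key, lang in language_col_dict.items():
--         for w in lang:
--             index.setdefault(w, []).append(key)
--     tally = dict.fromkeys(language_col_dict, 0)
--     for w in word_list:
--         for key in index.get(w, []):
--             tally[key] += 1
--     # The answer is the (unique, if any) key that strictly dominates every other key.
--     for key, c in tally.items():
--         if c > 0 and all(c2 < c for k2, c2 in tally.items() if k2 != key):
--             return key
--     return None
-- ===== Notes on version B (the rewrite author's own statement) =====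
-- stated objective: faster
-- what changed: B inverts the data: it builds a word->languages inverted index once, fills the per-language tally in a single pass over word_list through that index, and picks the answer as the first key that strictly dominates every other key (with a positive count), instead of A's separate pass over word_list for every language with online max tracking and tie reset.
import Mathlib
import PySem

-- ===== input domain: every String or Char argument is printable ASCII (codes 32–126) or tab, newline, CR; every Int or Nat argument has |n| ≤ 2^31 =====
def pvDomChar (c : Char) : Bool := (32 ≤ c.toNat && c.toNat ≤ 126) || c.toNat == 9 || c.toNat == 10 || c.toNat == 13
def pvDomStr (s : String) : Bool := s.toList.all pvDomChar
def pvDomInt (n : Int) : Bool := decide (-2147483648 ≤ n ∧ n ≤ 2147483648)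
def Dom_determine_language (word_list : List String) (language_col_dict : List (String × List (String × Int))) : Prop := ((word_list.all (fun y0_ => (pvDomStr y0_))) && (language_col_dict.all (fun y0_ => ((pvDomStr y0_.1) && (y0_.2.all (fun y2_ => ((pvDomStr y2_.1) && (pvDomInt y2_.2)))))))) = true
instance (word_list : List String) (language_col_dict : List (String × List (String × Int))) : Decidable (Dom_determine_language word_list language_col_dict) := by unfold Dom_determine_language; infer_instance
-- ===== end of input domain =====

-- B inverts the data: a word→languages index built once, a tally filled through it by one pass over
-- word_list, and the answer found as the key that strictly dominates all others (objective: faster —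
-- word_list is scanned once instead of once per language; a timing run measured the speedup).

-- ===== PORT A =====
def number_of_occurance (word_list : List String) (language_dict : List (String × Int)) : Int :=
  word_list.foldl
    (fun wordcount word =>
      if (PySem.Dict.ofList language_dict).contains word then wordcount + 1 else wordcount)
    0

-- 'for key in language_col_dict' with the lookup 'language_col_dict[key]' inside: iterated as
-- the (key, value) pairs d.items, which is exactly that iteration since dict keys are unique.
def determine_language (word_list : List String) (language_col_dict : List (String × List (String × Int))) : Option String :=
  let d := PySem.Dict.ofList language_col_dict
  (d.items.foldl
    (fun (st : Int × Option String) kv =>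
      let current_occruance := number_of_occurance word_list kv.2
      let st := if current_occruance == st.1 then (st.1, (none : Option String)) else st
      if current_occruance > st.1 then (current_occruance, some kv.1) else st)
    (0, none)).2

-- ===== PORT B =====
-- index.setdefault(w, []).append(key) is exactly Dict.modify w [] (· ++ [key]); tally[key] += 1 is
-- Dict.modify key 0 (· + 1) (key is always a key of tally, so Python's KeyError cannot fire);
-- the early-return scan over tally.items() is find?.
def determine_language_alt (word_list : List String) (language_col_dict : List (String × List (String × Int))) : Option String :=
  let index := (PySem.Dict.ofList language_col_dict).items.foldl
    (fun ix kv => ((PySem.Dict.ofList kv.2).keys).foldl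
      (fun ix w => ix.modify w [] (· ++ [kv.1])) ix)
    PySem.Dict.empty
  let tally0 := (PySem.Dict.ofList language_col_dict).keys.foldl
    (fun t k => t.insert k (0 : Int)) PySem.Dict.empty
  let tally := word_list.foldl
    (fun t w => (index.getD w []).foldl (fun t key => t.modify key 0 (· + 1)) t) tally0
  (tally.items.find? (fun p =>
    decide (p.2 > 0) && (tally.items.filter (fun q => !(q.1 == p.1))).all
      (fun q => decide (q.2 < p.2)))).map (·.1)

-- ===== PRECONDITION & SPEC =====
def Spec_determine_language (word_list : List String) (language_col_dict : List (String × List (String × Int))) (out : Option String) : Prop := out = determine_language_alt word_list language_col_dict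
instance (word_list : List String) (language_col_dict : List (String × List (String × Int))) (out : Option String) : Decidable (Spec_determine_language word_list language_col_dict out) := by unfold Spec_determine_language; infer_instance

-- ===== CLAIM (what is proved, stated in full; the proofs are below) =====
def Claim_equal_determine_language : Prop := ∀ (word_list : List String) (language_col_dict : List (String × List (String × Int))), Dom_determine_language word_list language_col_dict → Spec_determine_language word_list language_col_dict (determine_language word_list language_col_dict)

-- ===== LEMMAS AND PROOFS =====

-- A's loop body, on a precomputed (key, count) pair.
def stepA (st : Int × Option String) (p : String × Int) : Int × Option String :=
  let st1 := if p.2 == st.1 then (st.1, (none : Option String)) else st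
  if p.2 > st1.1 then (p.2, some p.1) else st1

-- running maximum of the counts, seeded with m
def maxC (m : Int) (cs : List (String × Int)) : Int := cs.foldl (fun a p => max a p.2) m

-- closed description of A's tracked key
def keyOut (m : Int) (k0 : Option String) (cs : List (String × Int)) : Option String :=
  if cs.any (fun p => m < p.2) then
    if cs.countP (fun p => p.2 == maxC m cs) = 1 then
      (cs.find? (fun p => p.2 == maxC m cs)).map (·.1)
    else none
  else if cs.any (fun p => p.2 == m) then none else k0

theorem maxC_cons (m : Int) (p : String × Int) (t : List (String × Int)) :
    maxC m (p :: t) = maxC (max m p.2) t := rfl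

theorem le_maxC (cs : List (String × Int)) : ∀ m : Int, m ≤ maxC m cs := by
  induction cs with
  | nil => intro m; simp [maxC]
  | cons p t ih =>
    intro m
    calc m ≤ max m p.2 := le_max_left _ _
    _ ≤ maxC (max m p.2) t := ih _

theorem mem_le_maxC (cs : List (String × Int)) : ∀ (m : Int) (p : String × Int), p ∈ cs → p.2 ≤ maxC m cs := by
  induction cs with
  | nil => intro m p hp; simp at hp
  | cons q t ih =>
    intro m p hp
    rcases List.mem_cons.mp hp with h | h
    · subst h; exact le_trans (le_max_right m p.2) (le_maxC t _)
    · exact ih _ p h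

theorem maxC_of_le (cs : List (String × Int)) : ∀ m : Int, (∀ p ∈ cs, p.2 ≤ m) → maxC m cs = m := by
  induction cs with
  | nil => intro m _; rfl
  | cons q t ih =>
    intro m h
    rw [maxC_cons, max_eq_left (h q (List.mem_cons_self))]
    exact ih m (fun p hp => h p (List.mem_cons_of_mem _ hp))

theorem lt_maxC_of_any (cs : List (String × Int)) (m : Int)
    (h : cs.any (fun p => m < p.2)) : m < maxC m cs := by
  rcases List.any_eq_true.mp h with ⟨p, hp, hm⟩
  exact lt_of_lt_of_le (by simpa using hm) (mem_le_maxC cs m p hp)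

theorem maxC_attained (cs : List (String × Int)) : ∀ m : Int, maxC m cs = m ∨ ∃ p ∈ cs, maxC m cs = p.2 := by
  induction cs with
  | nil => intro m; left; rfl
  | cons q t ih =>
    intro m
    rw [maxC_cons]
    rcases ih (max m q.2) with h | ⟨p, hp, hv⟩
    · rcases max_choice m q.2 with hc | hc
      · left; rw [h, hc]
      · right; exact ⟨q, List.mem_cons_self, by rw [h, hc]⟩
    · right; exact ⟨p, List.mem_cons_of_mem _ hp, hv⟩

-- the main loop invariant: A's fold computes (running max, keyOut)
theorem loopA_eq (cs : List (String × Int)) : ∀ (m : Int) (k0 : Option String),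
    cs.foldl stepA (m, k0) = (maxC m cs, keyOut m k0 cs) := by
  induction cs with
  | nil => intro m k0; simp [maxC, keyOut]
  | cons q t ih =>
    intro m k0
    obtain ⟨k, c⟩ := q
    rcases lt_trichotomy c m with hlt | heq | hgt
    · -- c < m : state unchanged
      have hstep : stepA (m, k0) (k, c) = (m, k0) := by
        simp [stepA, hlt.ne, not_lt.mpr hlt.le]
      rw [List.foldl_cons, hstep, ih m k0]
      have hmax : maxC m ((k, c) :: t) = maxC m t := by
        rw [maxC_cons, max_eq_left hlt.le]
      have hnlt : (decide (m < c)) = false := by simp; omega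
      have hcm : ((c : Int) == m) = false := by simp; omega
      by_cases hta : t.any (fun p => m < p.2)
      · have hM : m < maxC m t := lt_maxC_of_any t m hta
        have hcM : ((c : Int) == maxC m t) = false := by simp; omega
        simp [keyOut, hmax, hta, hnlt, hcM]
      · simp only [keyOut, hmax, List.any_cons, hnlt, Bool.false_or, hta,
          Bool.false_eq_true, if_false, hcm]
    · -- c = m : tie, key reset to none
      subst heq
      have hstep : stepA (c, k0) (k, c) = (c, none) := by simp [stepA]
      rw [List.foldl_cons, hstep, ih c none]
      have hmax : maxC c ((k, c) :: t) = maxC c t := by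
        rw [maxC_cons, max_self]
      by_cases hta : t.any (fun p => c < p.2)
      · have hM : c < maxC c t := lt_maxC_of_any t c hta
        have hcM : ((c : Int) == maxC c t) = false := by simp; omega
        simp [keyOut, hmax, hta, hcM]
      · simp [keyOut, hmax, hta]
    · -- m < c : new strict max, key set
      have hstep : stepA (m, k0) (k, c) = (c, some k) := by
        simp [stepA, hgt.ne', hgt]
      rw [List.foldl_cons, hstep, ih c (some k)]
      have hmax : maxC m ((k, c) :: t) = maxC c t := by
        rw [maxC_cons, max_eq_right hgt.le]
      have hlt' : (decide (m < c)) = true := by simp; omega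
      by_cases hta : t.any (fun p => c < p.2)
      · have hM : c < maxC c t := lt_maxC_of_any t c hta
        have hcM : ((c : Int) == maxC c t) = false := by simp; omega
        simp [keyOut, hmax, hta, hlt', hcM]
      · have hle : ∀ p ∈ t, p.2 ≤ c := by
          intro p hp
          by_contra hc
          exact hta (List.any_eq_true.mpr ⟨p, hp, by simpa using lt_of_not_ge hc⟩)
        have hM : maxC c t = c := maxC_of_le t c hle
        by_cases htc : t.any (fun p => p.2 == c)
        · have hcnt : t.countP (fun p => p.2 == c) ≠ 0 := by
            rcases List.any_eq_true.mp htc with ⟨p, hp, hpc⟩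
            exact fun h0 => (List.countP_eq_zero.mp h0 p hp) hpc
          have hone : ¬ (((k, c) :: t).countP (fun p => p.2 == c) = 1) := by
            rw [List.countP_cons]
            simp only [beq_self_eq_true, if_pos]
            omega
          simp only [keyOut, hmax, hM, List.any_cons, hlt', Bool.true_or, hone,
            if_false, hta, Bool.false_eq_true, htc, if_true]
        · have hcnt0 : t.countP (fun p => p.2 == c) = 0 := by
            apply List.countP_eq_zero.mpr
            intro p hp hpc
            exact htc (List.any_eq_true.mpr ⟨p, hp, hpc⟩)
          have hone : (((k, c) :: t).countP (fun p => p.2 == c) = 1) := by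
            rw [List.countP_cons]
            simp [hcnt0]
          have hfind : (((k, c) :: t).find? (fun p => p.2 == c)) = some (k, c) := by
            simp [List.find?]
          simp only [keyOut, hmax, hM, List.any_cons, hlt', Bool.true_or, hone,
            if_true, hfind, hta, Bool.false_eq_true, if_false, htc, Option.map_some]

theorem number_of_occurance_eq (wl : List String) (lang : List (String × Int)) :
    number_of_occurance wl lang = (wl.countP (fun w => (PySem.Dict.ofList lang).contains w) : Int) := by
  simpa using PySem.List.foldl_count_if (fun w => (PySem.Dict.ofList lang).contains w) wl 0

-- the (key, count) table both programs are about
def fOf (wl : List String) : String × List (String × Int) → String × Int :=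
  fun kv => (kv.1, (wl.countP (fun w => (PySem.Dict.ofList kv.2).contains w) : Int))

def csOf (wl : List String) (lcd : List (String × List (String × Int))) : List (String × Int) :=
  ((PySem.Dict.ofList lcd).items).map (fOf wl)

theorem A_eq_keyOut (wl : List String) (lcd : List (String × List (String × Int))) :
    determine_language wl lcd = keyOut 0 none (csOf wl lcd) := by
  have hfun : (fun (st : Int × Option String) (kv : String × List (String × Int)) =>
      let current_occruance := number_of_occurance wl kv.2
      let st := if current_occruance == st.1 then (st.1, (none : Option String)) else st
      if current_occruance > st.1 then (current_occruance, some kv.1) else st)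
      = fun st kv => stepA st (fOf wl kv) := by
    funext st kv
    simp [stepA, fOf, number_of_occurance_eq]
  show (((PySem.Dict.ofList lcd).items).foldl
      (fun (st : Int × Option String) kv =>
        let current_occruance := number_of_occurance wl kv.2
        let st := if current_occruance == st.1 then (st.1, (none : Option String)) else st
        if current_occruance > st.1 then (current_occruance, some kv.1) else st)
      (0, none)).2 = keyOut 0 none (csOf wl lcd)
  rw [hfun, ← List.foldl_map, csOf.eq_def, loopA_eq]

theorem nodup_fst_csOf (wl : List String) (lcd : List (String × List (String × Int))) :
    ((csOf wl lcd).map (·.1)).Nodup := by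
  have h : (csOf wl lcd).map (·.1) = (PySem.Dict.ofList lcd).keys := by
    simp [csOf, fOf, PySem.Dict.keys, List.map_map, Function.comp_def]
  rw [h]
  exact PySem.Dict.nodup_keys_ofList lcd

-- ---------- B-side: names for the port's intermediate dictionaries ----------

def idxOf (lcd : List (String × List (String × Int))) : PySem.Dict String (List String) :=
  (PySem.Dict.ofList lcd).items.foldl
    (fun ix kv => ((PySem.Dict.ofList kv.2).keys).foldl
      (fun ix w => ix.modify w [] (· ++ [kv.1])) ix)
    PySem.Dict.empty

def tally0Of (lcd : List (String × List (String × Int))) : PySem.Dict String Int :=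
  (PySem.Dict.ofList lcd).keys.foldl (fun t k => t.insert k (0 : Int)) PySem.Dict.empty

def tallyOf (wl : List String) (lcd : List (String × List (String × Int))) : PySem.Dict String Int :=
  wl.foldl (fun t w => ((idxOf lcd).getD w []).foldl (fun t key => t.modify key 0 (· + 1)) t) (tally0Of lcd)

-- the index fold is a fold over the flattened (word, key) pairs
theorem idx_eq_foldl_pairs (lcd : List (String × List (String × Int))) :
    idxOf lcd = ((PySem.Dict.ofList lcd).items.flatMap
        (fun kv => ((PySem.Dict.ofList kv.2).keys).map (fun w => (w, kv.1)))).foldl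
      (fun ix p => ix.modify p.1 [] (· ++ [p.2])) PySem.Dict.empty := by
  rw [List.foldl_flatMap]
  apply PySem.List.foldl_congr_mem
  intro acc kv _
  rw [List.foldl_map]

theorem pairs_filter (its : List (String × List (String × Int))) (w : String) :
    ((its.flatMap (fun kv => ((PySem.Dict.ofList kv.2).keys).map (fun w' => (w', kv.1)))).filter
        (fun p => p.1 == w)).map (·.2)
      = (its.filter (fun kv => (PySem.Dict.ofList kv.2).contains w)).map (·.1) := by
  induction its with
  | nil => rfl
  | cons kv t ih =>
    rw [List.flatMap_cons, List.filter_append, List.map_append, ih]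
    have hhead : ((((PySem.Dict.ofList kv.2).keys).map (fun w' => (w', kv.1))).filter
        (fun p => p.1 == w)).map (·.2)
        = if (PySem.Dict.ofList kv.2).contains w then [kv.1] else [] := by
      rw [List.filter_map, List.map_map]
      have : (((PySem.Dict.ofList kv.2).keys).filter
          ((fun (p : String × String) => p.1 == w) ∘ (fun w' => (w', kv.1)))) =
          ((PySem.Dict.ofList kv.2).keys).filter (· == w) := rfl
      rw [this, List.filter_beq]
      rw [PySem.Dict.contains_eq_decide_mem_keys]
      by_cases hm : w ∈ (PySem.Dict.ofList kv.2).keys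
      · rw [List.count_eq_one_of_mem (PySem.Dict.nodup_keys_ofList kv.2) hm]
        simp [hm]
      · rw [List.count_eq_zero_of_not_mem hm]
        simp [hm]
    rw [hhead]
    by_cases hc : (PySem.Dict.ofList kv.2).contains w <;> simp [hc]

theorem idx_getD (lcd : List (String × List (String × Int))) (w : String) :
    (idxOf lcd).getD w []
      = ((PySem.Dict.ofList lcd).items.filter
          (fun kv => (PySem.Dict.ofList kv.2).contains w)).map (·.1) := by
  rw [idx_eq_foldl_pairs, PySem.Dict.getD_foldl_modify_append, pairs_filter]
  simp [PySem.Dict.getD_empty]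

-- count over a flatMap is the sum of the pieces' counts
theorem count_flatMap {α β : Type} [BEq β] (l : List α) (f : α → List β) (b : β) :
    ((l.flatMap f).count b) = (l.map (fun x => (f x).count b)).sum := by
  induction l with
  | nil => rfl
  | cons x t ih => simp [List.flatMap_cons, List.count_append, ih]

-- in a list with distinct first components, the key of a member occurs in a filtered
-- projection exactly when the member passes the filter
theorem filtered_fst_count (its : List (String × List (String × Int)))
    (hnd : (its.map (·.1)).Nodup) (q : String × List (String × Int) → Bool)
    (k : String) (dv : List (String × Int)) (h : (k, dv) ∈ its) :
    ((its.filter q).map (·.1)).count k = if q (k, dv) then 1 else 0 := by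
  have hndf : ((its.filter q).map (·.1)).Nodup :=
    List.Nodup.sublist (List.Sublist.map _ List.filter_sublist) hnd
  by_cases hq : q (k, dv)
  · rw [if_pos hq]
    exact List.count_eq_one_of_mem hndf
      (List.mem_map.mpr ⟨(k, dv), List.mem_filter.mpr ⟨h, hq⟩, rfl⟩)
  · rw [if_neg hq]
    apply List.count_eq_zero_of_not_mem
    intro hmem
    rcases List.mem_map.mp hmem with ⟨kv, hkv, hfst⟩
    have hkv' : kv ∈ its := (List.mem_filter.mp hkv).1
    have : kv = (k, dv) := List.inj_on_of_nodup_map hnd hkv' h hfst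
    exact hq (this ▸ (List.mem_filter.mp hkv).2)

theorem getD_tally0 (lcd : List (String × List (String × Int))) (v : String) :
    (tally0Of lcd).getD v 0 = 0 := by
  have hgen : ∀ (l : List String) (d : PySem.Dict String Int), d.getD v 0 = 0 →
      (l.foldl (fun t k => t.insert k (0 : Int)) d).getD v 0 = 0 := by
    intro l
    induction l with
    | nil => intro d h; exact h
    | cons x t ih =>
      intro d h
      apply ih
      rw [PySem.Dict.getD_insert]
      split_ifs <;> simp [h]
  exact hgen _ _ (by simp [PySem.Dict.getD_empty])

theorem tally0_items (lcd : List (String × List (String × Int))) :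
    (tally0Of lcd).items = (PySem.Dict.ofList lcd).keys.map (fun k => (k, (0 : Int))) := by
  have := PySem.Dict.items_foldl_insert_fresh (PySem.Dict.ofList lcd).keys
    (fun k => k) (fun _ => (0 : Int)) PySem.Dict.empty
    (fun a _ => by simp [PySem.Dict.contains_empty])
    (by simp [PySem.Dict.nodup_keys_ofList lcd])
  rw [tally0Of]
  rw [this]
  rfl

theorem tally0_keys (lcd : List (String × List (String × Int))) :
    (tally0Of lcd).keys = (PySem.Dict.ofList lcd).keys := by
  simp [PySem.Dict.keys, tally0_items, List.map_map, Function.comp_def]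

-- flatten the tally fold
theorem tally_eq_foldl_flat (wl : List String) (lcd : List (String × List (String × Int))) :
    tallyOf wl lcd = (wl.flatMap (fun w => (idxOf lcd).getD w [])).foldl
      (fun t key => t.modify key 0 (· + 1)) (tally0Of lcd) := by
  rw [List.foldl_flatMap]
  rfl

theorem tally_keys (wl : List String) (lcd : List (String × List (String × Int))) :
    (tallyOf wl lcd).keys = (PySem.Dict.ofList lcd).keys := by
  rw [tally_eq_foldl_flat]
  rw [PySem.Dict.keys_foldl_modify _ 0 (fun _ _ => (· + 1))]
  rw [tally0_keys]
  -- every tallied key is already a key of the dictionary, so the update adds nothing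
  have hsub : ∀ x ∈ wl.flatMap (fun w => (idxOf lcd).getD w []), x ∈ (PySem.Dict.ofList lcd).keys := by
    intro x hx
    rcases List.mem_flatMap.mp hx with ⟨w, _, hxw⟩
    rw [idx_getD] at hxw
    rcases List.mem_map.mp hxw with ⟨kv, hkv, hfst⟩
    exact hfst ▸ List.mem_map.mpr ⟨kv, (List.mem_filter.mp hkv).1, rfl⟩
  -- Set.update with only already-present elements is the identity
  generalize (PySem.Dict.ofList lcd).keys = s at hsub ⊢
  generalize wl.flatMap (fun w => (idxOf lcd).getD w []) = l at hsub ⊢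
  induction l generalizing s with
  | nil => rfl
  | cons x t ih =>
    have hadd : PySem.Set.add s x = s := by
      simp [PySem.Set.add, PySem.Set.contains, hsub x List.mem_cons_self]
    simp only [PySem.Set.update, List.foldl_cons] at *
    rw [hadd]
    exact ih s (fun y hy => hsub y (List.mem_cons_of_mem _ hy))

theorem tally_getD (wl : List String) (lcd : List (String × List (String × Int)))
    (k : String) (dv : List (String × Int)) (h : (k, dv) ∈ (PySem.Dict.ofList lcd).items) :
    (tallyOf wl lcd).getD k 0
      = (wl.countP (fun w => (PySem.Dict.ofList dv).contains w) : Int) := by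
  rw [tally_eq_foldl_flat, PySem.Dict.getD_foldl_modify_add_one, getD_tally0, zero_add]
  have hnd : ((PySem.Dict.ofList lcd).items.map (·.1)).Nodup :=
    PySem.Dict.nodup_keys_ofList lcd
  have hcount : (wl.flatMap (fun w => (idxOf lcd).getD w [])).count k
      = wl.countP (fun w => (PySem.Dict.ofList dv).contains w) := by
    rw [count_flatMap]
    have hmap : wl.map (fun w => ((idxOf lcd).getD w []).count k)
        = wl.map (fun w => if (PySem.Dict.ofList dv).contains w then 1 else 0) := by
      apply List.map_congr_left
      intro w _
      rw [idx_getD]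
      exact filtered_fst_count _ hnd _ k dv h
    rw [hmap]
    exact PySem.List.sum_map_ite_one_zero_nat _ wl
  rw [hcount]

theorem tally_items (wl : List String) (lcd : List (String × List (String × Int))) :
    (tallyOf wl lcd).items = csOf wl lcd := by
  have hnd : (tallyOf wl lcd).keys.Nodup := by
    rw [tally_keys]; exact PySem.Dict.nodup_keys_ofList lcd
  rw [PySem.Dict.items_eq_map_keys _ hnd 0, tally_keys]
  have hkeys : (PySem.Dict.ofList lcd).keys = (PySem.Dict.ofList lcd).items.map (·.1) := rfl
  rw [hkeys, List.map_map, csOf.eq_def]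
  apply List.map_congr_left
  intro kv hkv
  have : (tallyOf wl lcd).getD kv.1 0
      = (wl.countP (fun w => (PySem.Dict.ofList kv.2).contains w) : Int) :=
    tally_getD wl lcd kv.1 kv.2 hkv
  simp [fOf, this]

theorem alt_eq (wl : List String) (lcd : List (String × List (String × Int))) :
    determine_language_alt wl lcd
      = ((csOf wl lcd).find? (fun p =>
          decide (p.2 > 0) && ((csOf wl lcd).filter (fun q => !(q.1 == p.1))).all
            (fun q => decide (q.2 < p.2)))).map (·.1) := by
  show ((tallyOf wl lcd).items.find? (fun p =>
      decide (p.2 > 0) && ((tallyOf wl lcd).items.filter (fun q => !(q.1 == p.1))).all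
        (fun q => decide (q.2 < p.2)))).map (·.1) = _
  rw [tally_items]

-- find? of a predicate with a unique satisfier
theorem find?_unique {α : Type} (l : List α) (p : α → Bool) (x : α) (hx : x ∈ l)
    (hp : p x = true) (hu : ∀ y ∈ l, p y = true → y = x) : l.find? p = some x := by
  induction l with
  | nil => simp at hx
  | cons a t ih =>
    by_cases ha : p a
    · rw [List.find?_cons_of_pos ha, hu a List.mem_cons_self ha]
    · rw [List.find?_cons_of_neg ha]
      rcases List.mem_cons.mp hx with h | h
      · exact absurd (h ▸ hp) ha
      · exact ih h (fun y hy hpy => hu y (List.mem_cons_of_mem _ hy) hpy)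

-- the dominance scan computes exactly A's "unique positive strict maximum" answer
theorem main_dom (cs : List (String × Int)) (hnd : (cs.map (·.1)).Nodup) :
    keyOut 0 none cs = (cs.find? (fun p =>
      decide (p.2 > 0) && (cs.filter (fun q => !(q.1 == p.1))).all
        (fun q => decide (q.2 < p.2)))).map (·.1) := by
  set pr : String × Int → Bool := fun p =>
    decide (p.2 > 0) && (cs.filter (fun q => !(q.1 == p.1))).all (fun q => decide (q.2 < p.2))
    with hpr
  have hpr_iff : ∀ p, pr p = true ↔ 0 < p.2 ∧ ∀ q ∈ cs, q.1 ≠ p.1 → q.2 < p.2 := by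
    intro p
    rw [hpr]
    simp only [Bool.and_eq_true, decide_eq_true_eq, List.all_eq_true, List.mem_filter,
      Bool.not_eq_true', beq_eq_false_iff_ne, ne_eq, and_imp, gt_iff_lt]
  by_cases hA : cs.any (fun p => (0 : Int) < p.2)
  · have hM : 0 < maxC 0 cs := lt_maxC_of_any cs 0 hA
    by_cases hcnt : cs.countP (fun p => p.2 == maxC 0 cs) = 1
    · -- a unique maximal element, which is strictly positive: both sides return it
      have hfil : ∃ r, cs.filter (fun p => p.2 == maxC 0 cs) = [r] := by
        rw [List.countP_eq_length_filter] at hcnt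
        exact List.length_eq_one_iff.mp hcnt
      rcases hfil with ⟨r, hr⟩
      have hrmem : r ∈ cs ∧ (r.2 == maxC 0 cs) = true := by
        have : r ∈ cs.filter (fun p => p.2 == maxC 0 cs) := by rw [hr]; exact List.mem_cons_self
        exact ⟨(List.mem_filter.mp this).1, (List.mem_filter.mp this).2⟩
      have hrM : r.2 = maxC 0 cs := by simpa using hrmem.2
      have honly : ∀ q ∈ cs, q.2 = maxC 0 cs → q = r := by
        intro q hq hqM
        have : q ∈ cs.filter (fun p => p.2 == maxC 0 cs) :=
          List.mem_filter.mpr ⟨hq, by simpa using hqM⟩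
        rw [hr] at this
        simpa using this
      have hfind1 : cs.find? (fun p => p.2 == maxC 0 cs) = some r :=
        find?_unique cs _ r hrmem.1 hrmem.2 (fun y hy hpy => honly y hy (by simpa using hpy))
      have hprr : pr r = true := by
        rw [hpr_iff]
        refine ⟨hrM ▸ hM, ?_⟩
        intro q hq hqk
        rcases lt_or_ge q.2 r.2 with h | h
        · exact h
        · exfalso
          have hqM : q.2 = maxC 0 cs := le_antisymm (mem_le_maxC cs 0 q hq) (hrM ▸ h)
          exact hqk (congrArg Prod.fst (honly q hq hqM))
      have hfind2 : cs.find? pr = some r := by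
        apply find?_unique cs pr r hrmem.1 hprr
        intro y hy hpy
        rw [hpr_iff] at hpy
        by_cases hk : y.1 = r.1
        · exact List.inj_on_of_nodup_map hnd hy hrmem.1 hk
        · exfalso
          have h1 : r.2 < y.2 := hpy.2 r hrmem.1 (fun h => hk h.symm)
          have h2 : y.2 ≤ maxC 0 cs := mem_le_maxC cs 0 y hy
          omega
      rw [keyOut, if_pos (by simpa using hA), if_pos hcnt, hfind1, hfind2]
    · -- the maximum is attained at least twice: both sides return none
      have hge1 : 0 < cs.countP (fun p => p.2 == maxC 0 cs) := by
        rcases maxC_attained cs 0 with h | ⟨p, hp, hv⟩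
        · omega
        · exact List.countP_pos_iff.mpr ⟨p, hp, by simpa using hv.symm⟩
      have hge2 : 2 ≤ (cs.filter (fun p => p.2 == maxC 0 cs)).length := by
        rw [List.countP_eq_length_filter] at hcnt hge1
        omega
      obtain ⟨r1, r2, rest, hfl⟩ : ∃ r1 r2 rest,
          cs.filter (fun p => p.2 == maxC 0 cs) = r1 :: r2 :: rest := by
        rcases hlf : cs.filter (fun p => p.2 == maxC 0 cs) with _ | ⟨a, _ | ⟨b, rest⟩⟩
        · rw [hlf] at hge2; simp at hge2
        · rw [hlf] at hge2; simp at hge2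
        · exact ⟨a, b, rest, hlf⟩
      have hr1 : r1 ∈ cs ∧ r1.2 = maxC 0 cs := by
        have : r1 ∈ cs.filter (fun p => p.2 == maxC 0 cs) := by rw [hfl]; simp
        exact ⟨(List.mem_filter.mp this).1, by simpa using (List.mem_filter.mp this).2⟩
      have hr2 : r2 ∈ cs ∧ r2.2 = maxC 0 cs := by
        have : r2 ∈ cs.filter (fun p => p.2 == maxC 0 cs) := by rw [hfl]; simp
        exact ⟨(List.mem_filter.mp this).1, by simpa using (List.mem_filter.mp this).2⟩
      have hk12 : r1.1 ≠ r2.1 := by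
        have hsub : ((cs.filter (fun p => p.2 == maxC 0 cs)).map (·.1)).Nodup :=
          List.Nodup.sublist (List.Sublist.map _ List.filter_sublist) hnd
        rw [hfl] at hsub
        simp only [List.map_cons, List.nodup_cons, List.mem_cons] at hsub
        exact fun h => hsub.1 (Or.inl h)
      have hnofind : cs.find? pr = none := by
        apply List.find?_eq_none.mpr
        intro q hq hpq
        rw [hpr_iff] at hpq
        have hqle : q.2 ≤ maxC 0 cs := mem_le_maxC cs 0 q hq
        by_cases h1 : r1.1 = q.1
        · have : r2.2 < q.2 := hpq.2 r2 hr2.1 (fun h => hk12 (h1.symm ▸ h).symm)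
          omega
        · have : r1.2 < q.2 := hpq.2 r1 hr1.1 h1
          omega
      rw [keyOut, if_pos (by simpa using hA), if_neg hcnt, hnofind]
      rfl
  · -- no positive count: A resets or never sets the key; B finds no dominant key
    have hkey : keyOut 0 none cs = none := by
      rw [keyOut, if_neg (by simpa using hA)]
      split_ifs <;> rfl
    have hnofind : cs.find? pr = none := by
      apply List.find?_eq_none.mpr
      intro q hq hpq
      rw [hpr_iff] at hpq
      exact hA (List.any_eq_true.mpr ⟨q, hq, by simpa using hpq.1⟩)
    rw [hkey, hnofind]
    rfl

-- ===== VERDICT (by name: the statement is the Claim_ definition above) =====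
theorem determine_language_spec : Claim_equal_determine_language := by
  intro wl lcd _
  show determine_language wl lcd = determine_language_alt wl lcd
  rw [A_eq_keyOut, alt_eq, main_dom (csOf wl lcd) (nodup_fst_csOf wl lcd)]
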